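-- pv_equiv track=rewrite | github.com/simonjeonsw/ai-system-spec | lib/policy_engine.py | _sustained_increase_streak
-- ===== SOURCE A (Python) =====
-- from typing import Any, Dict, List, Optional
--
-- def _sustained_increase_streak(values: List[int]) -> int:
--     if len(values) < 2:
--         return 0
--     streak = 0
--     for idx in range(1, len(values)):
--         if values[idx] > values[idx - 1]:
--             streak += 1
--         else:
--             streak = 0
--     return streak
-- ===== SOURCE B (Python) =====
-- def _sustained_increase_streak(values):
--     if len(values) < 2:
--         return 0
--     streak = 0
--     for idx in range(len(values) - 1, 0, -1):
--         if values[idx] > values[idx - 1]: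
--             streak += 1
--         else:
--             break
--     return streak
-- ===== Notes on version B (the rewrite author's own statement) =====
-- stated objective: faster
-- what changed: B walks backward from the end and stops at the first non-increase (the trailing streak depends only on the suffix), instead of A's full forward pass that resets a counter on every non-increase.
import Mathlib
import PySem

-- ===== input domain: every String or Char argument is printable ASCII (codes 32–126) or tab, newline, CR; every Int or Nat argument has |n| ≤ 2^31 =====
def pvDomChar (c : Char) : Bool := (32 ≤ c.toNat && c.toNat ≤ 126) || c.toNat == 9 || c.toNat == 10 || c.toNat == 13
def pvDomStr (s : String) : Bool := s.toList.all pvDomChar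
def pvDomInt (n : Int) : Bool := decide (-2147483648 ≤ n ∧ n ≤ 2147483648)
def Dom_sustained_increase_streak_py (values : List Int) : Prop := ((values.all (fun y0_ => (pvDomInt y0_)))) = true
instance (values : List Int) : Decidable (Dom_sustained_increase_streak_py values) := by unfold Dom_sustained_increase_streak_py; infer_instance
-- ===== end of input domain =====

-- B re-implements the trailing-streak count as a backward scan from the end with early
-- termination, instead of A's forward pass that resets a counter on every non-increase.

-- ===== PORT A =====
-- forward pass: streak += 1 on increase, reset to 0 otherwise
def sustained_increase_streak_py (values : List Int) : Int :=
  if values.length < 2 then 0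
  else
    (PySem.List.pyRange 1 (values.length : Int)).foldl
      (fun streak idx =>
        if PySem.List.pyGetD values (idx - 1) 0 < PySem.List.pyGetD values idx 0 then
          streak + 1
        else 0) 0

-- ===== PORT B =====
-- backward iteration over indices len-1 .. 1 = structural recursion on the reversed list;
-- the `else break` of Source B is the `else 0` (no further recursive call).
def pvAltGo : List Int → Int
  | a :: b :: t => if b < a then 1 + pvAltGo (b :: t) else 0
  | _ => 0

def sustained_increase_streak_py_alt (values : List Int) : Int :=
  if values.length < 2 then 0 else pvAltGo values.reverse

-- ===== PRECONDITION & SPEC =====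
def Spec_sustained_increase_streak_py (values : List Int) (out : Int) : Prop := out = sustained_increase_streak_py_alt values
instance (values : List Int) (out : Int) : Decidable (Spec_sustained_increase_streak_py values out) := by unfold Spec_sustained_increase_streak_py; infer_instance

-- ===== CLAIM (what is proved, stated in full; the proofs are below) =====
def Claim_equal_sustained_increase_streak_py : Prop := ∀ (values : List Int), Dom_sustained_increase_streak_py values → Spec_sustained_increase_streak_py values (sustained_increase_streak_py values)

-- ===== LEMMAS AND PROOFS =====

-- A's forward fold over indices, applied to r.reverse, computes pvAltGo r.
lemma pv_key (r : List Int) :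
    (PySem.List.pyRange 1 (r.reverse.length : Int)).foldl
      (fun streak idx =>
        if PySem.List.pyGetD r.reverse (idx - 1) 0 < PySem.List.pyGetD r.reverse idx 0 then
          streak + 1
        else 0) 0 = pvAltGo r := by
  induction r with
  | nil => simp [pvAltGo, PySem.List.pyRange]
  | cons x t ih =>
    cases t with
    | nil => simp [pvAltGo, PySem.List.pyRange]
    | cons y t' =>
      have hl' : (x :: y :: t').reverse = (y :: t').reverse ++ [x] := by simp
      have hn0 : (y :: t').reverse.length = t'.length + 1 := by simp
      have hlen : (((x :: y :: t').reverse.length : Nat) : Int)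
          = (((y :: t').reverse.length : Nat) : Int) + 1 := by
        simp; ring
      have hone : (1 : Int) ≤ (((y :: t').reverse.length : Nat) : Int) := by
        rw [hn0]; omega
      rw [hlen, PySem.List.pyRange_one_succ_right hone, List.foldl_append]
      have hget : ∀ (j : Int), 0 ≤ j → j < (((y :: t').reverse.length : Nat) : Int) →
          PySem.List.pyGetD ((x :: y :: t').reverse) j 0
            = PySem.List.pyGetD ((y :: t').reverse) j 0 := by
        intro j hj0 hjlt
        rw [PySem.List.pyGetD_of_nonneg _ _ hj0, PySem.List.pyGetD_of_nonneg _ _ hj0, hl']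
        exact List.getD_append _ _ _ _ (by omega)
      have hcongr :
          (PySem.List.pyRange 1 (((y :: t').reverse.length : Nat) : Int)).foldl
            (fun (streak : Int) idx =>
              if PySem.List.pyGetD ((x :: y :: t').reverse) (idx - 1) 0
                  < PySem.List.pyGetD ((x :: y :: t').reverse) idx 0 then streak + 1 else 0) 0
          = (PySem.List.pyRange 1 (((y :: t').reverse.length : Nat) : Int)).foldl
            (fun (streak : Int) idx =>
              if PySem.List.pyGetD ((y :: t').reverse) (idx - 1) 0
                  < PySem.List.pyGetD ((y :: t').reverse) idx 0 then streak + 1 else 0) 0 := by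
        apply PySem.List.foldl_congr_mem
        intro acc i hi
        rw [PySem.List.mem_pyRange_one] at hi
        rw [hget (i - 1) (by omega) (by omega), hget i (by omega) (by omega)]
      simp only [List.foldl_cons, List.foldl_nil]
      rw [hcongr, ih]
      -- the last loop iteration, idx = length - 1 of the extended list
      have hx : PySem.List.pyGetD ((x :: y :: t').reverse)
          (((y :: t').reverse.length : Nat) : Int) 0 = x := by
        rw [PySem.List.pyGetD_natCast, hl']
        simp
      have hy : PySem.List.pyGetD ((x :: y :: t').reverse)
          ((((y :: t').reverse.length : Nat) : Int) - 1) 0 = y := by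
        have : ((((y :: t').reverse.length : Nat) : Int) - 1) = ((t'.length : Nat) : Int) := by
          rw [hn0]; push_cast; ring
        rw [this, PySem.List.pyGetD_natCast, hl',
            List.getD_append _ _ _ _ (by rw [hn0]; omega)]
        have hrev : (y :: t').reverse = t'.reverse ++ [y] := by simp
        rw [hrev]
        have : ((t'.reverse ++ [y]).getD t'.length 0) = (t'.reverse ++ [y]).getD t'.reverse.length 0 := by simp
        rw [this]
        simp
      simp only [hx, hy, pvAltGo]
      split <;> omega

-- ===== VERDICT (by name: the statement is the Claim_ definition above) =====
theorem sustained_increase_streak_py_spec : Claim_equal_sustained_increase_streak_py := by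
  intro values _
  unfold Spec_sustained_increase_streak_py sustained_increase_streak_py sustained_increase_streak_py_alt
  split
  · rfl
  · have := pv_key values.reverse
    simpa using this
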